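-- pv_equiv track=rewrite | github.com/levelup-fpga/dev_levelup_shared | fpga_rtl/constant_multiplier_package/explore_mult.py | csd_encode
-- ===== SOURCE A (Python) =====
-- from typing import List, Tuple
--
-- def csd_encode(value: int, max_bits: int = 16) -> List[int]:
--     if value < 0:
--         raise ValueError("csd_encode expects non-negative integer")
--     n = value
--     out = []
--     i = 0
--     limit = max_bits + 1
--     while (n > 0 or i < 1) and i < limit:
--         if (n & 1) == 0:
--             out.append(0)
--             n >>= 1
--         else:
--             rem = n & 3
--             if rem == 1:
--                 out.append(1)
--                 n = (n - 1) >> 1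
--             else:
--                 out.append(-1)
--                 n = (n + 1) >> 1
--         i += 1
--     while len(out) < limit:
--         out.append(0)
--     return out
-- ===== SOURCE B (Python) =====
-- from typing import List
--
-- def csd_encode(value: int, max_bits: int = 16) -> List[int]:
--     if value < 0:
--         raise ValueError("csd_encode expects non-negative integer")
--     n3 = 3 * value
--     diff = n3 ^ value
--     pos = (n3 & diff) >> 1
--     neg = (value & diff) >> 1
--     return [1 if (pos >> k) & 1 else (-1 if (neg >> k) & 1 else 0)
--             for k in range(max_bits + 1)]
-- ===== Notes on version B (the rewrite author's own statement) =====
-- stated objective: simpler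
-- what changed: Replaced A's carry-propagating per-bit while-loop (with its odd first-iteration guard and zero-padding pass) by the closed-form NAF bitmasks pos=(3v&(3v^v))>>1, neg=(v&(3v^v))>>1 followed by one flat loop reading off the max_bits+1 digits.
import Mathlib
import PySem

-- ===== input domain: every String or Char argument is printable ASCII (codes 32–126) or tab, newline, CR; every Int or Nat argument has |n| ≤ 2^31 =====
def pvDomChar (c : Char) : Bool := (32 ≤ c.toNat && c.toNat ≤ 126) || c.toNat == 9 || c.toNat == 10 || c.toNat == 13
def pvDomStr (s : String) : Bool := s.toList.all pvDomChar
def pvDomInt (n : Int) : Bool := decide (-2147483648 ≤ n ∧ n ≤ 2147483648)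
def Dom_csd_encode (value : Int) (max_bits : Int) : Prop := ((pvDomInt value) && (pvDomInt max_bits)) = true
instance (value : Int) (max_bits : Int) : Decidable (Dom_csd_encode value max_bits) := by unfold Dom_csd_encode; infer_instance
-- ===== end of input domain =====

-- B replaces A's carry-propagating per-bit CSD loop by the closed-form NAF bitmasks
-- pos = (3v & (3v ^ v)) >> 1, neg = (v & (3v ^ v)) >> 1 followed by a flat digit-read loop
-- (objective: simpler; same asymptotic cost).

-- ===== PORT A =====
-- while (n > 0 or i < 1) and i < limit: …  (i increases each turn, bounded by limit)
def csdLoopA (n : Int) (out : List Int) (i : Int) (limit : Int) : List Int :=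
  if h : (0 < n ∨ i < 1) ∧ i < limit then
    if PySem.Int.band n 1 = 0 then
      csdLoopA (n >>> (1:Nat)) (out ++ [0]) (i + 1) limit
    else if PySem.Int.band n 3 = 1 then
      csdLoopA ((n - 1) >>> (1:Nat)) (out ++ [1]) (i + 1) limit
    else
      csdLoopA ((n + 1) >>> (1:Nat)) (out ++ [-1]) (i + 1) limit
  else out
termination_by (limit - i).toNat
decreasing_by all_goals omega

def csd_encode (value : Int) (max_bits : Int) : List Int :=
  if value < 0 then []   -- Python raises ValueError here; excluded by Pre_csd_encode
  else
    let limit : Int := max_bits + 1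
    let out := csdLoopA value [] 0 limit
    -- while len(out) < limit: out.append(0)
    out ++ List.replicate (limit - (out.length : Int)).toNat 0

-- ===== PORT B =====
-- For value ≥ 0 Python's ^ & >> on int coincide with Nat.xor/land/shiftRight
-- (value < 0 raises in Source B too; excluded by Pre_csd_encode).
def csd_encode_alt (value : Int) (max_bits : Int) : List Int :=
  if value < 0 then []
  else
    let v := value.toNat
    let n3 := 3 * v
    let diff := n3 ^^^ v
    let pos := (n3 &&& diff) >>> 1
    let neg := (v &&& diff) >>> 1
    (PySem.List.pyRange 0 (max_bits + 1) 1).map (fun k =>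
      if (pos >>> k.toNat) &&& 1 = 1 then 1
      else if (neg >>> k.toNat) &&& 1 = 1 then (-1 : Int) else 0)

-- ===== PRECONDITION & SPEC =====
-- Pre_ excludes value < 0, where A raises ValueError.
def Pre_csd_encode (value : Int) (max_bits : Int) : Prop := 0 ≤ value
instance (value : Int) (max_bits : Int) : Decidable (Pre_csd_encode value max_bits) := by unfold Pre_csd_encode; infer_instance
def pvWitness_csd_encode : Int × Int := (11, 5)

def Spec_csd_encode (value : Int) (max_bits : Int) (out : List Int) : Prop := out = csd_encode_alt value max_bits
instance (value : Int) (max_bits : Int) (out : List Int) : Decidable (Spec_csd_encode value max_bits out) := by unfold Spec_csd_encode; infer_instance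

-- ===== CLAIM (what is proved, stated in full; the proofs are below) =====
def Claim_equal_csd_encode : Prop := ∀ (value : Int) (max_bits : Int), Dom_csd_encode value max_bits → Pre_csd_encode value max_bits → Spec_csd_encode value max_bits (csd_encode value max_bits)

-- ===== LEMMAS AND PROOFS =====

lemma d2 (a b : Nat) (hb : b ≤ 1) : (2*a+b)/2 = a := by omega

lemma bit2and (a c b d : Nat) (hb : b ≤ 1) (hd : d ≤ 1) :
    (2*a+b) &&& (2*c+d) = 2*(a&&&c)+(b&&&d) := by
  have hbd : b &&& d ≤ 1 := by interval_cases b <;> interval_cases d <;> decide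
  refine Nat.eq_of_testBit_eq fun i => ?_
  rw [Nat.testBit_and]
  cases i with
  | zero =>
    simp only [Nat.testBit_zero]
    have h1 : (2*a+b) % 2 = b % 2 := by omega
    have h2 : (2*c+d) % 2 = d % 2 := by omega
    have h3 : (2*(a&&&c)+(b&&&d)) % 2 = (b&&&d) % 2 := by omega
    rw [h1, h2, h3]
    interval_cases b <;> interval_cases d <;> decide
  | succ i =>
    simp only [Nat.testBit_add_one, d2 a b hb, d2 c d hd, d2 _ _ hbd, Nat.testBit_and]

lemma bit2xor (a c b d : Nat) (hb : b ≤ 1) (hd : d ≤ 1) :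
    (2*a+b) ^^^ (2*c+d) = 2*(a^^^c)+(b^^^d) := by
  have hbd : b ^^^ d ≤ 1 := by interval_cases b <;> interval_cases d <;> decide
  refine Nat.eq_of_testBit_eq fun i => ?_
  rw [Nat.testBit_xor]
  cases i with
  | zero =>
    simp only [Nat.testBit_zero]
    have h1 : (2*a+b) % 2 = b % 2 := by omega
    have h2 : (2*c+d) % 2 = d % 2 := by omega
    have h3 : (2*(a^^^c)+(b^^^d)) % 2 = (b^^^d) % 2 := by omega
    rw [h1, h2, h3]
    interval_cases b <;> interval_cases d <;> decide
  | succ i =>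
    simp only [Nat.testBit_add_one, d2 a b hb, d2 c d hd, d2 _ _ hbd, Nat.testBit_xor]

-- specialized little-end decompositions
lemma and00 (a c : Nat) : 2*a &&& 2*c = 2*(a&&&c) := by
  have := bit2and a c 0 0 (by omega) (by omega); simpa using this
lemma and01 (a c : Nat) : 2*a &&& (2*c+1) = 2*(a&&&c) := by
  have := bit2and a c 0 1 (by omega) (by omega); simpa using this
lemma and10 (a c : Nat) : (2*a+1) &&& 2*c = 2*(a&&&c) := by
  have := bit2and a c 1 0 (by omega) (by omega); simpa using this
lemma and11 (a c : Nat) : (2*a+1) &&& (2*c+1) = 2*(a&&&c)+1 := by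
  have := bit2and a c 1 1 (by omega) (by omega); simpa using this
lemma xor00 (a c : Nat) : 2*a ^^^ 2*c = 2*(a^^^c) := by
  have := bit2xor a c 0 0 (by omega) (by omega); simpa using this
lemma xor01 (a c : Nat) : 2*a ^^^ (2*c+1) = 2*(a^^^c)+1 := by
  have := bit2xor a c 0 1 (by omega) (by omega); simpa using this
lemma xor10 (a c : Nat) : (2*a+1) ^^^ 2*c = 2*(a^^^c)+1 := by
  have := bit2xor a c 1 0 (by omega) (by omega); simpa using this
lemma xor11 (a c : Nat) : (2*a+1) ^^^ (2*c+1) = 2*(a^^^c) := by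
  have := bit2xor a c 1 1 (by omega) (by omega); simpa using this

-- the two NAF masks (before the final >> 1)
def Pm (n : Nat) : Nat := 3*n &&& (3*n ^^^ n)
def Qm (n : Nat) : Nat := n &&& (3*n ^^^ n)

lemma key0 (x y : Nat) : 2*x &&& (2*x ^^^ 2*y) = 2*(x &&& (x ^^^ y)) := by
  rw [xor00, and00]
lemma key0q (x y : Nat) : 2*y &&& (2*x ^^^ 2*y) = 2*(y &&& (x ^^^ y)) := by
  rw [xor00, and00]
lemma keyE1 (x y : Nat) : (2*x+1) &&& ((2*x+1) ^^^ (2*y+1)) = 2*(x &&& (x ^^^ y)) := by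
  rw [xor11, and10]
lemma keyE1q (x y : Nat) : (2*y+1) &&& ((2*x+1) ^^^ (2*y+1)) = 2*(y &&& (x ^^^ y)) := by
  rw [xor11, and10]
lemma key1 (x y : Nat) :
    (2*(2*x+1)+1) &&& ((2*(2*x+1)+1) ^^^ (2*(2*y)+1)) = 4*(x &&& (x ^^^ y)) + 2 := by
  rw [xor11, xor10, and10, and11]; omega
lemma key1q (x y : Nat) :
    (2*(2*y)+1) &&& ((2*(2*x+1)+1) ^^^ (2*(2*y)+1)) = 4*(y &&& (x ^^^ y)) := by
  rw [xor11, xor10, and10, and01]; omega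
lemma key3 (x y : Nat) :
    (2*(2*x)+1) &&& ((2*(2*x)+1) ^^^ (2*(2*y+1)+1)) = 4*(x &&& (x ^^^ y)) := by
  rw [xor11, xor01, and10, and01]; omega
lemma key3q (x y : Nat) :
    (2*(2*y+1)+1) &&& ((2*(2*x)+1) ^^^ (2*(2*y+1)+1)) = 4*(y &&& (x ^^^ y)) + 2 := by
  rw [xor11, xor01, and10, and11]; omega

lemma P_double (m : Nat) : Pm (2*m) = 2 * Pm m := by
  unfold Pm
  rw [show 3*(2*m) = 2*(3*m) from by ring, key0]

lemma Q_double (m : Nat) : Qm (2*m) = 2 * Qm m := by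
  unfold Qm
  rw [show 3*(2*m) = 2*(3*m) from by ring, key0q]

lemma P_4m1 (m : Nat) : Pm (4*m+1) = 4 * Pm m + 2 := by
  unfold Pm
  rw [show (4*m+1 : Nat) = 2*(2*m)+1 from by ring,
    show 3*(2*(2*m)+1) = 2*(2*(3*m)+1)+1 from by ring, key1]

lemma Q_4m1 (m : Nat) : Qm (4*m+1) = 4 * Qm m := by
  unfold Qm
  rw [show (4*m+1 : Nat) = 2*(2*m)+1 from by ring,
    show 3*(2*(2*m)+1) = 2*(2*(3*m)+1)+1 from by ring, key1q]

-- carry identities, by strong induction on m (split on parity)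
lemma F_id : ∀ m : Nat, (3*m+2) &&& ((3*m+2) ^^^ m) = Pm (m+1) := by
  intro m
  induction m using Nat.strong_induction_on with
  | _ m ih =>
    by_cases h2 : m % 2 = 0
    · obtain ⟨t, rfl⟩ : ∃ t, m = 2*t := ⟨m/2, by omega⟩
      rw [show 3*(2*t)+2 = 2*(3*t+1) from by ring, key0]
      show _ = Pm (2*t+1)
      unfold Pm
      rw [show (2*t+1 : Nat) = 2*t+1 from rfl,
        show 3*(2*t+1) = 2*(3*t+1)+1 from by ring, keyE1]
    · obtain ⟨t, rfl⟩ : ∃ t, m = 2*t+1 := ⟨m/2, by omega⟩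
      rw [show 3*(2*t+1)+2 = 2*(3*t+2)+1 from by ring, keyE1,
        ih t (by omega),
        show (2*t+1+1 : Nat) = 2*(t+1) from by ring, P_double]

lemma G_id : ∀ m : Nat, m &&& ((3*m+2) ^^^ m) = Qm (m+1) := by
  intro m
  induction m using Nat.strong_induction_on with
  | _ m ih =>
    by_cases h2 : m % 2 = 0
    · obtain ⟨t, rfl⟩ : ∃ t, m = 2*t := ⟨m/2, by omega⟩
      rw [show 3*(2*t)+2 = 2*(3*t+1) from by ring, key0q]
      show _ = Qm (2*t+1)
      unfold Qm
      rw [show 3*(2*t+1) = 2*(3*t+1)+1 from by ring, keyE1q]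
    · obtain ⟨t, rfl⟩ : ∃ t, m = 2*t+1 := ⟨m/2, by omega⟩
      rw [show 3*(2*t+1)+2 = 2*(3*t+2)+1 from by ring, keyE1q,
        ih t (by omega),
        show (2*t+1+1 : Nat) = 2*(t+1) from by ring, Q_double]

lemma P_4m3 (m : Nat) : Pm (4*m+3) = 4 * Pm (m+1) := by
  unfold Pm
  rw [show (4*m+3 : Nat) = 2*(2*m+1)+1 from by ring,
    show 3*(2*(2*m+1)+1) = 2*(2*(3*m+2))+1 from by ring, key3, F_id]
  unfold Pm
  rfl

lemma Q_4m3 (m : Nat) : Qm (4*m+3) = 4 * Qm (m+1) + 2 := by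
  unfold Qm
  rw [show (4*m+3 : Nat) = 2*(2*m+1)+1 from by ring,
    show 3*(2*(2*m+1)+1) = 2*(2*(3*m+2))+1 from by ring, key3q, G_id]
  unfold Qm
  rfl

lemma P_even (n : Nat) : Pm n % 2 = 0 := by
  by_cases h2 : n % 2 = 0
  · obtain ⟨m, rfl⟩ : ∃ m, n = 2*m := ⟨n/2, by omega⟩
    rw [P_double]; omega
  · by_cases h4 : n % 4 = 1
    · obtain ⟨m, rfl⟩ : ∃ m, n = 4*m+1 := ⟨n/4, by omega⟩
      rw [P_4m1]; omega
    · obtain ⟨m, rfl⟩ : ∃ m, n = 4*m+3 := ⟨n/4, by omega⟩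
      rw [P_4m3]; omega

lemma Q_even (n : Nat) : Qm n % 2 = 0 := by
  by_cases h2 : n % 2 = 0
  · obtain ⟨m, rfl⟩ : ∃ m, n = 2*m := ⟨n/2, by omega⟩
    rw [Q_double]; omega
  · by_cases h4 : n % 4 = 1
    · obtain ⟨m, rfl⟩ : ∃ m, n = 4*m+1 := ⟨n/4, by omega⟩
      rw [Q_4m1]; omega
    · obtain ⟨m, rfl⟩ : ∃ m, n = 4*m+3 := ⟨n/4, by omega⟩
      rw [Q_4m3]; omega

-- A's per-step digit and next state (on Nat)
def adig (n : Nat) : Int := if n % 2 = 0 then 0 else if n % 4 = 1 then 1 else -1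
def astep (n : Nat) : Nat := if n % 2 = 0 then n/2 else if n % 4 = 1 then (n-1)/2 else (n+1)/2

def arun : Nat → Nat → List Int
  | _, 0 => []
  | n, f+1 => if n = 0 then [] else adig n :: arun (astep n) f

-- B's digit k, read off the masks (pos = Pm v >>> 1, so digit k tests bit k+1 of Pm v)
def digPQ (v k : Nat) : Int :=
  if (Pm v >>> (k+1)) &&& 1 = 1 then 1
  else if (Qm v >>> (k+1)) &&& 1 = 1 then -1 else 0

lemma sh1 (x b : Nat) (hb : b ≤ 1) : (2*x+b) >>> 1 = x := by
  rw [Nat.shiftRight_one]; omega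

lemma sh_step (x b j : Nat) (hb : b ≤ 1) : (2*x+b) >>> (j+1) = x >>> j := by
  rw [show j+1 = 1+j from by omega, Nat.shiftRight_add, sh1 x b hb]

lemma shE (x j : Nat) : (2*x) >>> (j+1) = x >>> j := sh_step x 0 j (by omega)
lemma shO (x j : Nat) : (2*x+1) >>> (j+1) = x >>> j := sh_step x 1 j (by omega)
lemma sh40 (x j : Nat) : (4*x) >>> (j+1) = (2*x) >>> j := by
  rw [show 4*x = 2*(2*x) from by ring, shE]
lemma sh42 (x j : Nat) : (4*x+2) >>> (j+1) = (2*x+1) >>> j := by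
  rw [show 4*x+2 = 2*(2*x+1) from by ring, shE]

lemma and_one_mod (x : Nat) : x &&& 1 = x % 2 := Nat.and_one_is_mod x

lemma adig_even (m : Nat) : adig (2*m) = 0 := by rw [adig, if_pos (by omega)]
lemma adig_4m1 (m : Nat) : adig (4*m+1) = 1 := by
  rw [adig, if_neg (by omega), if_pos (by omega)]
lemma adig_4m3 (m : Nat) : adig (4*m+3) = -1 := by
  rw [adig, if_neg (by omega), if_neg (by omega)]
lemma astep_even (m : Nat) : astep (2*m) = m := by rw [astep, if_pos (by omega)]; omega
lemma astep_4m1 (m : Nat) : astep (4*m+1) = 2*m := by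
  rw [astep, if_neg (by omega), if_pos (by omega)]; omega
lemma astep_4m3 (m : Nat) : astep (4*m+3) = 2*(m+1) := by
  rw [astep, if_neg (by omega), if_neg (by omega)]; omega

lemma dig_zero (v : Nat) : digPQ v 0 = adig v := by
  by_cases h2 : v % 2 = 0
  · obtain ⟨m, rfl⟩ : ∃ m, v = 2*m := ⟨v/2, by omega⟩
    simp only [adig_even, digPQ, P_double, Q_double, shE, Nat.shiftRight_zero, and_one_mod]
    have := P_even m; have := Q_even m
    rw [if_neg (by omega), if_neg (by omega)]
  · by_cases h4 : v % 4 = 1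
    · obtain ⟨m, rfl⟩ : ∃ m, v = 4*m+1 := ⟨v/4, by omega⟩
      simp only [adig_4m1, digPQ, P_4m1, sh42, Nat.shiftRight_zero, and_one_mod]
      rw [if_pos (by omega)]
    · obtain ⟨m, rfl⟩ : ∃ m, v = 4*m+3 := ⟨v/4, by omega⟩
      simp only [adig_4m3, digPQ, P_4m3, Q_4m3, sh40, sh42, Nat.shiftRight_zero, and_one_mod]
      have := P_even (m+1)
      rw [if_neg (by omega), if_pos (by omega)]

lemma dig_succ (v k : Nat) : digPQ v (k+1) = digPQ (astep v) k := by
  by_cases h2 : v % 2 = 0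
  · obtain ⟨m, rfl⟩ : ∃ m, v = 2*m := ⟨v/2, by omega⟩
    simp only [astep_even, digPQ, P_double, Q_double, shE]
  · by_cases h4 : v % 4 = 1
    · obtain ⟨m, rfl⟩ : ∃ m, v = 4*m+1 := ⟨v/4, by omega⟩
      simp only [astep_4m1, digPQ, P_4m1, Q_4m1, P_double, Q_double, sh42, sh40, shE, shO]
    · obtain ⟨m, rfl⟩ : ∃ m, v = 4*m+3 := ⟨v/4, by omega⟩
      simp only [astep_4m3, digPQ, P_4m3, Q_4m3, P_double, Q_double, sh42, sh40, shE, shO]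

lemma arun_zero (f : Nat) : arun 0 f = [] := by
  cases f <;> simp [arun]

lemma arun_length_le (v f : Nat) : (arun v f).length ≤ f := by
  induction f generalizing v with
  | zero => simp [arun]
  | succ f ih =>
    rw [arun]
    split
    · simp
    · simpa using ih (astep v)

lemma digPQ_zero_val (k : Nat) : digPQ 0 k = 0 := by
  simp [digPQ, Pm, Qm]

-- truncated-and-padded A run = B's digit list
lemma main_lemma (L v : Nat) :
    arun v L ++ List.replicate (L - (arun v L).length) 0 = (List.range L).map (digPQ v) := by
  induction L generalizing v with
  | zero => simp [arun]
  | succ L ih =>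
    by_cases hv : v = 0
    · subst hv
      rw [show arun 0 (L+1) = [] from by rw [arun, if_pos rfl]]
      rw [List.map_congr_left (fun x _ => digPQ_zero_val x), List.map_const', List.length_range]
      simp
    · rw [arun]
      simp only [if_neg hv]
      have hlen := arun_length_le (astep v) L
      have hc : (L + 1) - (adig v :: arun (astep v) L).length = L - (arun (astep v) L).length := by
        simp only [List.length_cons]; omega
      rw [List.range_succ_eq_map, List.map_cons, List.cons_append, hc, ih (astep v),
        List.map_map, ← dig_zero]
      congr 1
      refine (List.map_congr_left fun x _ => ?_).symm
      simp only [Function.comp_apply, Nat.succ_eq_add_one]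
      exact dig_succ v x

-- bridge: Python bit ops on a nonnegative int, in Nat terms
lemma band_one_cast (m : Nat) : PySem.Int.band (↑m) 1 = ((m % 2 : Nat) : Int) := by
  have : PySem.Int.band (↑m) 1 = PySem.Int.band (↑m) ((1:Nat):Int) := by norm_num
  rw [this, PySem.Int.band_natCast, and_one_mod]

lemma and_three_mod (m : Nat) : m &&& 3 = m % 4 := by
  have h := bit2and (m/2) 1 (m%2) 1 (by omega) (by omega)
  have e1 : 2*(m/2)+m%2 = m := by omega
  have e2 : (2*1+1 : Nat) = 3 := by norm_num
  rw [e1, e2] at h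
  rw [h, and_one_mod, and_one_mod]
  omega

lemma band_three_cast (m : Nat) : PySem.Int.band (↑m) 3 = ((m % 4 : Nat) : Int) := by
  have : PySem.Int.band (↑m) 3 = PySem.Int.band (↑m) ((3:Nat):Int) := by norm_num
  rw [this, PySem.Int.band_natCast, and_three_mod]

lemma shiftRight_cast (m k : Nat) : (↑m : Int) >>> k = ((m >>> k : Nat) : Int) := rfl

-- loop characterization
lemma loop_char (f : Nat) : ∀ (n i limit : Int) (out : List Int),
    (limit - i).toNat = f → 0 ≤ n → 0 ≤ i → (1 ≤ n ∨ 1 ≤ i) →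
    csdLoopA n out i limit = out ++ arun n.toNat f := by
  induction f with
  | zero =>
    intro n i limit out hf hn hi hni
    rw [csdLoopA, dif_neg (by omega), arun]
    simp
  | succ f ih =>
    intro n i limit out hf hn hi hni
    have hil : i < limit := by omega
    by_cases hn0 : n = 0
    · subst hn0
      have h1i : 1 ≤ i := by omega
      rw [csdLoopA, dif_neg (by omega)]
      simp [arun]
    · have hpos : 1 ≤ n := by omega
      obtain ⟨m, rfl⟩ : ∃ m : Nat, n = ↑m := ⟨n.toNat, (Int.toNat_of_nonneg hn).symm⟩
      have hm1 : 1 ≤ m := by omega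
      rw [csdLoopA, dif_pos ⟨Or.inl (by omega), hil⟩, band_one_cast, band_three_cast]
      rw [show (arun (↑m : Int).toNat (f+1)) = adig m :: arun (astep m) f from by
        rw [Int.toNat_natCast, arun, if_neg (by omega)]]
      by_cases h2 : m % 2 = 0
      · rw [if_pos (by exact_mod_cast congrArg (Nat.cast : Nat → Int) h2), shiftRight_cast]
        rw [ih _ _ _ _ (by omega) (by positivity) (by omega) (Or.inr (by omega))]
        rw [adig, if_pos h2, astep, if_pos h2, Int.toNat_natCast, Nat.shiftRight_one]
        simp
      · have hne : ¬ ((m % 2 : Nat) : Int) = 0 := by exact_mod_cast h2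
        rw [if_neg hne]
        by_cases h4 : m % 4 = 1
        · rw [if_pos (by exact_mod_cast congrArg (Nat.cast : Nat → Int) h4)]
          rw [show ((m:Int) - 1) = ((m - 1 : Nat) : Int) from by omega, shiftRight_cast]
          rw [ih _ _ _ _ (by omega) (by positivity) (by omega) (Or.inr (by omega))]
          rw [adig, if_neg h2, if_pos h4, astep, if_neg h2, if_pos h4,
            Int.toNat_natCast, Nat.shiftRight_one]
          simp
        · have hne4 : ¬ ((m % 4 : Nat) : Int) = 1 := by exact_mod_cast h4
          rw [if_neg hne4]
          rw [show ((m:Int) + 1) = ((m + 1 : Nat) : Int) from by omega, shiftRight_cast]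
          rw [ih _ _ _ _ (by omega) (by positivity) (by omega) (Or.inr (by omega))]
          rw [adig, if_neg h2, if_neg h4, astep, if_neg h2, if_neg h4,
            Int.toNat_natCast, Nat.shiftRight_one]
          simp

-- the mapped entry of port B is digPQ
lemma alt_entry (v k : Nat) :
    (if ((3*v &&& (3*v ^^^ v)) >>> 1 >>> k) &&& 1 = 1 then (1:Int)
     else if ((v &&& (3*v ^^^ v)) >>> 1 >>> k) &&& 1 = 1 then -1 else 0) = digPQ v k := by
  rw [digPQ, ← Nat.shiftRight_add, ← Nat.shiftRight_add, Nat.add_comm 1 k]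
  rfl

-- ===== VERDICT (by name: the statement is the Claim_ definition above) =====
theorem csd_encode_spec : Claim_equal_csd_encode := by
  intro value max_bits _ hpre
  unfold Pre_csd_encode at hpre
  unfold Spec_csd_encode
  rw [csd_encode, csd_encode_alt, if_neg (by omega), if_neg (by omega)]
  simp only []
  by_cases hl : max_bits + 1 ≤ 0
  · rw [PySem.List.pyRange_one_eq_nil hl, List.map_nil]
    rw [csdLoopA, dif_neg (by omega)]
    simp
    omega
  · have hl' : 0 < max_bits + 1 := by omega
    set v : Nat := value.toNat with hv
    have hval : value = ↑v := by omega
    set L : Nat := (max_bits + 1).toNat with hLdef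
    have hL1 : 1 ≤ L := by omega
    have hLcast : (max_bits + 1 : Int) = ↑L := by omega
    -- B side
    have hB : (PySem.List.pyRange 0 (max_bits + 1) 1).map (fun k : Int =>
        if (((3*v &&& (3*v ^^^ v)) >>> 1) >>> k.toNat) &&& 1 = 1 then (1:Int)
        else if (((v &&& (3*v ^^^ v)) >>> 1) >>> k.toNat) &&& 1 = 1 then -1 else 0)
        = (List.range L).map (digPQ v) := by
      rw [PySem.List.pyRange_one, List.map_map]
      rw [show (max_bits + 1 - 0).toNat = L from by omega]
      refine List.map_congr_left fun x _ => ?_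
      simp only [Function.comp_apply, zero_add, Int.toNat_natCast]
      exact alt_entry v x
    rw [hB]
    -- A side
    by_cases hv0 : value = 0
    · have hv0' : v = 0 := by omega
      rw [hv0, csdLoopA, dif_pos ⟨Or.inr (by omega), by omega⟩]
      rw [show PySem.Int.band 0 1 = 0 from rfl, if_pos rfl]
      rw [show ((0:Int) >>> (1:Nat)) = 0 from rfl,
        show ([]:List Int) ++ [0] = [0] from rfl, show ((0:Int)+1) = 1 from by norm_num]
      rw [loop_char (max_bits + 1 - 1).toNat 0 1 (max_bits+1) [0] (by omega) (by omega)
        (by omega) (Or.inr (by omega))]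
      rw [show ((0:Int)).toNat = 0 from rfl, arun_zero]
      have hzeros : (List.range L).map (digPQ v) = List.replicate L 0 := by
        rw [hv0', List.map_congr_left (fun x _ => digPQ_zero_val x), List.map_const',
          List.length_range]
      rw [hzeros]
      simp only [List.append_nil, List.length_cons, List.length_nil]
      rw [show ((max_bits + 1 - ((1:Nat):Int)).toNat) = L - 1 from by omega]
      rw [show L = (L-1) + 1 from by omega, List.replicate_succ]
      simp
    · have hv1 : 1 ≤ value := by omega
      rw [hval, loop_char (max_bits + 1 - 0).toNat _ 0 (max_bits+1) [] (by omega)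
        (by omega) (by omega) (Or.inl (by omega))]
      rw [Int.toNat_natCast, show (max_bits + 1 - 0).toNat = L from by omega]
      rw [List.nil_append]
      have hlen := arun_length_le v L
      rw [show (max_bits + 1 - ((arun v L).length : Int)).toNat = L - (arun v L).length from by omega]
      exact main_lemma L v
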